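-- pv_equiv track=rewrite | github.com/neilerer/ByteMe | data/functions/JourneyPatternID/bus_stops.py | not_in_all_weekdays
-- ===== SOURCE A (Python) =====
-- def unique_stops(specific_weekday_routes):
-- 	# list of stops
-- 	stops = []
-- 	# iterate over the lists
-- 	for stop_list in specific_weekday_routes:
-- 		# iterate over the elements in the list
-- 		for stop in stop_list:
-- 			# check for inclusion
-- 			if stop not in stops:
-- 				# add if not already there
-- 				stops.append(stop)
-- 	# return stops
-- 	return stops
--
-- def not_in_all_weekdays(list_of_lists):
-- 	result = []
-- 	unique_values = unique_stops(list_of_lists)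
-- 	for uv in unique_values:
-- 		for array in list_of_lists:
-- 			if uv not in array:
-- 				if uv not in result:
-- 					result.append(uv)
-- 				continue
-- 	return result
-- ===== SOURCE B (Python) =====
-- def not_in_all_weekdays(list_of_lists):
--     # one pass: count, for each stop, how many of the lists contain it;
--     # dict preserves first-appearance order across the whole input
--     counts = {}
--     for lst in list_of_lists:
--         for stop in dict.fromkeys(lst):
--             counts[stop] = counts.get(stop, 0) + 1
--     k = len(list_of_lists)
--     return [stop for stop in counts if counts[stop] < k]
-- ===== Notes on version B (the rewrite author's own statement) =====
-- stated objective: faster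
-- what changed: Instead of collecting unique stops with repeated list-membership scans and then rescanning every list (and the result) per stop, B makes one pass building a dict from stop to the number of lists containing it, then keeps the stops (in the dict's first-appearance order) whose count is below the number of lists.
import Mathlib
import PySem

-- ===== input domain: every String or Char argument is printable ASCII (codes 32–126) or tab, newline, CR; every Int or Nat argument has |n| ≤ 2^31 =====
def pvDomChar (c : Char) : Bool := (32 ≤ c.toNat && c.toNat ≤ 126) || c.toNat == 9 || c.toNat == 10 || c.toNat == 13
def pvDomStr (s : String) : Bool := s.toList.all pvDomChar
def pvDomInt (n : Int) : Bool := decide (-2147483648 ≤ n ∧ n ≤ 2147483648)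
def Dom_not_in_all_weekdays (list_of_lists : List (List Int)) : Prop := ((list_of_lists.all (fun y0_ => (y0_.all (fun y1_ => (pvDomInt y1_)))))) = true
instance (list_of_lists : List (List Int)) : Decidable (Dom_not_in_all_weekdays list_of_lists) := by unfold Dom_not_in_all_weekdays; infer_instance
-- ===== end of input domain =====

-- B replaces A's nested repeated membership scans by one counting pass over the input
-- (dict: stop ↦ number of lists containing it) plus one filter over the dict's keys; faster.

-- ===== PORT A =====
def unique_stops (specific_weekday_routes : List (List Int)) : List Int :=
  specific_weekday_routes.foldl (fun stops stop_list =>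
    stop_list.foldl (fun stops stop =>
      if stop ∈ stops then stops else stops ++ [stop]) stops) []

def not_in_all_weekdays (list_of_lists : List (List Int)) : List Int :=
  let unique_values := unique_stops list_of_lists
  unique_values.foldl (fun result uv =>
    list_of_lists.foldl (fun result array =>
      if uv ∉ array then
        (if uv ∉ result then result ++ [uv] else result)
      else result) result) []

-- ===== PORT B =====
def not_in_all_weekdays_alt (list_of_lists : List (List Int)) : List Int :=
  let counts := list_of_lists.foldl (fun d lst =>
    (PySem.List.dedup lst).foldl (fun d stop => d.insert stop (d.getD stop 0 + 1)) d)
    PySem.Dict.empty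
  let k : Int := list_of_lists.length
  counts.keys.filter (fun stop => decide (counts.getD stop 0 < k))

-- ===== PRECONDITION & SPEC =====
def Spec_not_in_all_weekdays (list_of_lists : List (List Int)) (out : List Int) : Prop := out = not_in_all_weekdays_alt list_of_lists
instance (list_of_lists : List (List Int)) (out : List Int) : Decidable (Spec_not_in_all_weekdays list_of_lists out) := by unfold Spec_not_in_all_weekdays; infer_instance

-- ===== CLAIM (what is proved, stated in full; the proofs are below) =====
def Claim_equal_not_in_all_weekdays : Prop := ∀ (list_of_lists : List (List Int)), Dom_not_in_all_weekdays list_of_lists → Spec_not_in_all_weekdays list_of_lists (not_in_all_weekdays list_of_lists)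

-- ===== LEMMAS AND PROOFS =====

-- the value stored in B's dict is the number of lists containing the stop
theorem counts_getD (L : List (List Int)) (d : PySem.Dict Int Int) (v : Int) :
    (L.foldl (fun d lst =>
      (PySem.List.dedup lst).foldl (fun d stop => d.insert stop (d.getD stop 0 + 1)) d) d).getD v 0
    = d.getD v 0 + (L.countP (fun lst => decide (v ∈ lst)) : Int) := by
  induction L generalizing d with
  | nil => simp
  | cons lst rest ih =>
    simp only [List.foldl_cons, ih, PySem.Dict.getD_foldl_insert_add_one, List.countP_cons]
    by_cases h : v ∈ lst
    · rw [List.count_eq_one_of_mem (PySem.List.nodup_dedup lst) ((PySem.List.mem_dedup lst v).mpr h)]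
      simp [h]; ring
    · rw [List.count_eq_zero_of_not_mem (fun hc => h ((PySem.List.mem_dedup lst v).mp hc))]
      simp [h]

theorem update_dedup (s : PySem.Set Int) (lst : List Int) :
    PySem.Set.update s (PySem.List.dedup lst) = PySem.Set.update s lst := by
  rw [PySem.Set.update_eq_append_filter, PySem.Set.update_eq_append_filter,
    PySem.List.dedup_eq_ofList, PySem.Set.ofList_ofList]

-- B's dict keys are built by the same ordered-union fold as A's unique_stops
theorem counts_keys (L : List (List Int)) (d : PySem.Dict Int Int) :
    (L.foldl (fun d lst =>
      (PySem.List.dedup lst).foldl (fun d stop => d.insert stop (d.getD stop 0 + 1)) d) d).keys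
    = L.foldl (fun s lst => PySem.Set.update s lst) d.keys := by
  induction L generalizing d with
  | nil => rfl
  | cons lst rest ih =>
    simp only [List.foldl_cons, ih, PySem.Dict.keys_foldl_insert, update_dedup]

theorem inner_add (xs : List Int) (s : List Int) :
    xs.foldl (fun st x => if x ∈ st then st else st ++ [x]) s = PySem.Set.update s xs := by
  rw [PySem.Set.update]
  exact PySem.List.foldl_congr_mem _ _ _ _ (fun acc x _ => (PySem.Set.add_eq_ite acc x).symm)

theorem unique_stops_eq (L : List (List Int)) :
    unique_stops L = L.foldl (fun s lst => PySem.Set.update s lst) [] := by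
  unfold unique_stops
  exact PySem.List.foldl_congr_mem _ _ _ _ (fun s lst _ => inner_add lst s)

theorem nodup_foldl_update (L : List (List Int)) (s : PySem.Set Int) (h : s.Nodup) :
    (L.foldl (fun s lst => PySem.Set.update s lst) s).Nodup := by
  induction L generalizing s with
  | nil => exact h
  | cons lst rest ih => exact ih _ (PySem.Set.nodup_update _ _ h)

-- A's inner loop over the lists appends uv once iff uv misses some list and is new
theorem innerA (L : List (List Int)) (u : Int) (r : List Int) :
    L.foldl (fun result array =>
      if u ∉ array then
        (if u ∉ result then result ++ [u] else result)
      else result) r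
    = if (∀ arr ∈ L, u ∈ arr) ∨ u ∈ r then r else r ++ [u] := by
  induction L generalizing r with
  | nil => simp
  | cons arr rest ih =>
    simp only [List.foldl_cons]
    by_cases ha : u ∈ arr
    · simp only [ha, not_true, ih]
      by_cases hall : ∀ a ∈ rest, u ∈ a <;> by_cases hr : u ∈ r <;>
        simp [hall, hr, ha]
    · by_cases hr : u ∈ r
      · simp only [if_pos ha, if_neg (by simp [hr] : ¬ u ∉ r), ih]
        simp [hr]
      · simp only [if_pos ha, if_pos hr, ih]
        have : u ∈ r ++ [u] := by simp
        simp [this, ha, hr]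

theorem outerA (L : List (List Int)) (uv : List Int) (r : List Int)
    (hnd : uv.Nodup) (hdisj : ∀ u ∈ uv, u ∉ r) :
    uv.foldl (fun result u =>
      if (∀ arr ∈ L, u ∈ arr) ∨ u ∈ result then result else result ++ [u]) r
    = r ++ uv.filter (fun u => !decide (∀ arr ∈ L, u ∈ arr)) := by
  induction uv generalizing r with
  | nil => simp
  | cons u rest ih =>
    have hur : u ∉ r := hdisj u (by simp)
    simp only [List.foldl_cons, List.filter_cons]
    by_cases hall : ∀ arr ∈ L, u ∈ arr
    · rw [if_pos (Or.inl hall), ih _ hnd.of_cons (fun x hx => hdisj x (by simp [hx]))]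
      simp
      exact hall
    · rw [if_neg (by simp [hall, hur]),
        ih _ hnd.of_cons (fun x hx => by
          simp only [List.mem_append, List.mem_singleton]
          rintro (h | h)
          · exact hdisj x (by simp [hx]) h
          · exact (List.nodup_cons.mp hnd).1 (h ▸ hx))]
      simp [hall]

theorem filter_pred_eq (L : List (List Int)) (u : Int) :
    (decide ((L.countP (fun lst => decide (u ∈ lst)) : Int) < (L.length : Int)))
    = (!decide (∀ arr ∈ L, u ∈ arr)) := by
  by_cases h : ∀ arr ∈ L, u ∈ arr
  · have : L.countP (fun lst => decide (u ∈ lst)) = L.length :=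
      List.countP_eq_length.mpr (fun a ha => by simp [h a ha])
    simp [this]
    exact h
  · have hlt : L.countP (fun lst => decide (u ∈ lst)) < L.length := by
      rcases lt_or_eq_of_le List.countP_le_length with hl | he
      · exact hl
      · exact absurd (fun a ha => by simpa using List.countP_eq_length.mp he a ha) h
    simp only [h, decide_false, Bool.not_false]
    rw [decide_eq_true_eq]
    exact_mod_cast hlt

-- ===== VERDICT (by name: the statement is the Claim_ definition above) =====
theorem not_in_all_weekdays_spec : Claim_equal_not_in_all_weekdays := by
  intro L _
  unfold Spec_not_in_all_weekdays not_in_all_weekdays not_in_all_weekdays_alt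
  simp only [counts_keys, counts_getD, PySem.Dict.keys_empty, PySem.Dict.getD_empty]
  rw [← unique_stops_eq]
  have hnd : (unique_stops L).Nodup := by
    rw [unique_stops_eq]; exact nodup_foldl_update L [] List.nodup_nil
  have h1 : (unique_stops L).foldl (fun result uv =>
      L.foldl (fun result array =>
        if uv ∉ array then
          (if uv ∉ result then result ++ [uv] else result)
        else result) result) []
      = (unique_stops L).foldl (fun result u =>
        if (∀ arr ∈ L, u ∈ arr) ∨ u ∈ result then result else result ++ [u]) [] :=
    PySem.List.foldl_congr_mem _ _ _ _ (fun r u _ => innerA L u r)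
  rw [h1, outerA L (unique_stops L) [] hnd (by simp)]
  simp only [List.nil_append]
  exact (List.filter_congr (fun u _ => by rw [zero_add]; exact filter_pred_eq L u)).symm
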